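-- pv_equiv track=rewrite | github.com/Guzz-T/python-luxtronik | luxtronik/data_vector.py | pack_values
-- ===== SOURCE A (Python) =====
-- def pack_values(values, num_bits, reverse=True):
--     """
--     Packs a list of data chunks into one integer.
--
--     Args:
--         values (list[int]): raw data; distributed across multiple registers.
--         num_bits (int): Number of bits per chunk.
--         reverse (bool): Use big-endian/MSB-first if true,
--             otherwise use little-endian/LSB-first order.
--
--     Returns:
--         int: Packed raw data as a single integer value.
--
--     Note:
--         The smart home interface uses a chunk size of 16 bits.
--     """
--     count = len(values)
--     mask = (1 << num_bits) - 1
--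
--     result = 0
--     for idx, value in enumerate(values):
--         # normal: idx = 0..n-1
--         # reversed index: highest chunk first
--         bit_index = (count - 1 - idx) if reverse else idx
--
--         result |= (value & mask) << (num_bits * bit_index)
--
--     return result
-- ===== SOURCE B (Python) =====
-- def pack_values(values, num_bits, reverse=True):
--     """Packs a list of data chunks into one integer (Horner-style accumulator)."""
--     mask = (1 << num_bits) - 1
--     result = 0
--     # MSB-first: first chunk ends up highest, so iterate in the order whose
--     # first element must land in the top register.
--     for value in (values if reverse else reversed(values)):
--         result = (result << num_bits) + (value & mask)
--     return result
-- ===== Notes on version B (the rewrite author's own statement) =====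
-- stated objective: simpler
-- what changed: Replaces the enumerate/bit_index/per-chunk shift-and-OR accumulation with a Horner-style fold: iterate the chunks in MSB-first order (values as-is when reverse, reversed(values) otherwise) and do result = (result << num_bits) + (value & mask), dropping count, enumerate and all position arithmetic.
import Mathlib
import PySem

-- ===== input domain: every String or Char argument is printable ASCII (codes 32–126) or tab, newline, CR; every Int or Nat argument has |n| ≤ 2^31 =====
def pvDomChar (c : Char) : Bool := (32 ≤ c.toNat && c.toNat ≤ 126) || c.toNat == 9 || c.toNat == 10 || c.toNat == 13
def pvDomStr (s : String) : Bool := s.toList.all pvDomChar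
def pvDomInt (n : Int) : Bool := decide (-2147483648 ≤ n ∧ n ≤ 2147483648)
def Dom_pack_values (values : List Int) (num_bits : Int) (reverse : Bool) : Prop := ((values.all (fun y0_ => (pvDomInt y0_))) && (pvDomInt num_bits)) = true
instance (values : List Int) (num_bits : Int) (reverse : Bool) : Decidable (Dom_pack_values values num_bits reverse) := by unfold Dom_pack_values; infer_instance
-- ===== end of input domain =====

-- B replaces A's enumerate/bit-index shift-and-OR packing by a Horner-style accumulator fold
-- over the chunks in MSB-first order (objective: simpler).


-- ===== PORT A =====
-- Python's `<<` is `<<<` with a Nat shift; the `.toNat` on the shift amounts is exact under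
-- Pre_ (0 ≤ num_bits, hence every shift amount is nonnegative; Python raises ValueError otherwise).
def pack_values (values : List Int) (num_bits : Int) (reverse : Bool) : Int :=
  let count : Int := values.length
  let mask : Int := ((1 : Int) <<< num_bits.toNat) - 1
  (PySem.List.enumerate values).foldl
    (fun result p =>
      let bit_index : Int := if reverse then count - 1 - p.1 else p.1
      PySem.Int.bor result ((PySem.Int.band p.2 mask) <<< (num_bits * bit_index).toNat)) 0

-- ===== PORT B =====
def pack_values_alt (values : List Int) (num_bits : Int) (reverse : Bool) : Int :=
  let mask : Int := ((1 : Int) <<< num_bits.toNat) - 1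
  (if reverse then values else values.reverse).foldl
    (fun result value => (result <<< num_bits.toNat) + PySem.Int.band value mask) 0

-- ===== PRECONDITION & SPEC =====
-- Pre_ excludes num_bits < 0, on which the Python A (and B) raises ValueError ('negative shift count').
def Pre_pack_values (values : List Int) (num_bits : Int) (reverse : Bool) : Prop := 0 ≤ num_bits
instance (values : List Int) (num_bits : Int) (reverse : Bool) : Decidable (Pre_pack_values values num_bits reverse) := by unfold Pre_pack_values; infer_instance
def pvWitness_pack_values : List Int × Int × Bool := ([1, 2, 3], 4, true)

def Spec_pack_values (values : List Int) (num_bits : Int) (reverse : Bool) (out : Int) : Prop := out = pack_values_alt values num_bits reverse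
instance (values : List Int) (num_bits : Int) (reverse : Bool) (out : Int) : Decidable (Spec_pack_values values num_bits reverse out) := by unfold Spec_pack_values; infer_instance

-- ===== CLAIM (what is proved, stated in full; the proofs are below) =====
def Claim_equal_pack_values : Prop := ∀ (values : List Int) (num_bits : Int) (reverse : Bool), Dom_pack_values values num_bits reverse → Pre_pack_values values num_bits reverse → Spec_pack_values values num_bits reverse (pack_values values num_bits reverse)

-- ===== LEMMAS AND PROOFS =====

-- OR of disjoint bit ranges is addition.
theorem lor_mul_pow_add : ∀ (k : Nat) (a b : Nat), b < 2^k → a * 2^k ||| b = a * 2^k + b := by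
  intro k
  induction k with
  | zero => intro a b hb; interval_cases b <;> simp
  | succ k ih =>
    intro a b hb
    have hdec : Nat.bit (b.testBit 0) (b >>> 1) = b := Nat.bit_testBit_zero_shiftRight_one b
    have hb2 : b >>> 1 = b / 2 := Nat.shiftRight_one b
    have h1 : a * 2^(k+1) = Nat.bit false (a * 2^k) := by simp [Nat.bit]; ring
    have htb : b.testBit 0 = decide (b % 2 = 1) := Nat.testBit_zero b
    rw [h1, ← hdec, Nat.lor_bit, ih _ _ (by rw [hb2]; omega)]
    rw [hdec]
    cases h : b.testBit 0 <;> rw [h] at htb <;> simp at htb <;>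
      simp [Nat.bit, hb2] <;> ring_nf <;> omega

-- the masked chunk, as a natural number
def chunkN (m : Nat) (v : Int) : Nat := (PySem.Int.band v ((1 : Int) <<< m - 1)).toNat

def bigVal (m : Nat) : List Int → Nat
  | [] => 0
  | v :: t => chunkN m v * (2^m)^t.length + bigVal m t

def littleVal (m : Nat) : List Int → Nat
  | [] => 0
  | v :: t => chunkN m v + 2^m * littleVal m t

theorem mask_eq (m : Nat) : ((1 : Int) <<< m - 1) = 2^m - 1 := by
  rw [Int.shiftLeft_eq]; ring

theorem band_mask_bounds (v : Int) (m : Nat) :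
    0 ≤ PySem.Int.band v ((1 : Int) <<< m - 1) ∧ chunkN m v < 2^m := by
  have hcast : ((2:Int)^m) = ((2^m : Nat) : Int) := by push_cast; ring
  have hpos : (1:Nat) ≤ 2^m := Nat.one_le_two_pow
  have htn : ((2:Int)^m - 1).toNat = 2^m - 1 := by omega
  have hmk : (0:Int) ≤ 2^m - 1 := by omega
  unfold chunkN PySem.Int.band
  rw [mask_eq]
  split_ifs with h1
  · refine ⟨Int.natCast_nonneg _, ?_⟩
    rw [Int.toNat_natCast]
    have hle : v.toNat &&& ((2:Int)^m - 1).toNat ≤ ((2:Int)^m - 1).toNat := Nat.and_le_right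
    omega
  · refine ⟨Int.natCast_nonneg _, ?_⟩
    rw [Int.toNat_natCast]
    have hle := Nat.sub_le (((2:Int)^m - 1).toNat) ((((2:Int)^m - 1).toNat &&& (-v - 1).toNat))
    omega

theorem band_eq_chunkN (v : Int) (m : Nat) :
    PySem.Int.band v ((1 : Int) <<< m - 1) = (chunkN m v : Int) :=
  (Int.toNat_of_nonneg (band_mask_bounds v m).1).symm

-- B's Horner fold, characterised
theorem hornerB (m : Nat) : ∀ (l : List Int) (r : Nat),
    l.foldl (fun (result : Int) value => (result <<< m) + PySem.Int.band value ((1 : Int) <<< m - 1)) (r : Int)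
      = ((r * (2^m)^l.length + bigVal m l : Nat) : Int) := by
  intro l
  induction l with
  | nil => intro r; simp [bigVal]
  | cons v t ih =>
    intro r
    have hstep : ((r : Int) <<< m) + PySem.Int.band v ((1 : Int) <<< m - 1)
        = ((r * 2^m + chunkN m v : Nat) : Int) := by
      rw [Int.shiftLeft_eq, band_eq_chunkN]; push_cast; ring
    rw [List.foldl_cons, hstep, ih]
    congr 1
    simp [bigVal, List.length_cons]
    ring

-- A's fold, reverse = true (descending bit positions)
theorem foldA_rev (m n : Nat) : ∀ (l : List Int) (s a : Nat), s + l.length = n →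
    (PySem.List.enumerate l (s : Int)).foldl
      (fun result p => PySem.Int.bor result
        ((PySem.Int.band p.2 ((1 : Int) <<< m - 1)) <<< (((m : Int) * ((n : Int) - 1 - p.1)).toNat)))
      ((a * 2^(m*(n-s)) : Nat) : Int)
      = ((a * 2^(m*(n-s)) + bigVal m l : Nat) : Int) := by
  intro l
  induction l with
  | nil => intro s a _; simp [PySem.List.enumerate_nil, bigVal]
  | cons v t ih =>
    intro s a hlen
    have hs : s + 1 ≤ n := by simp [List.length_cons] at hlen; omega
    have hshift : (((m : Int)) * ((n : Int) - 1 - (s : Int))).toNat = m * (n - 1 - s) := by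
      have h : ((n : Int) - 1 - (s : Int)) = ((n - 1 - s : Nat) : Int) := by omega
      rw [h, ← Nat.cast_mul, Int.toNat_natCast]
    have hcn := (band_mask_bounds v m).2
    have hns : m * (n - s) = m * (n - 1 - s) + m := by
      have h : n - s = (n - 1 - s) + 1 := by omega
      rw [h]; ring
    have hlt : chunkN m v * 2^(m*(n-1-s)) < 2^(m*(n-s)) := by
      calc chunkN m v * 2^(m*(n-1-s)) < 2^m * 2^(m*(n-1-s)) :=
            (Nat.mul_lt_mul_right (Nat.two_pow_pos _)).mpr hcn
        _ = 2^(m*(n-s)) := by rw [hns, Nat.pow_add]; ring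
    have hor : a * 2^(m*(n-s)) ||| chunkN m v * 2^(m*(n-1-s))
        = a * 2^(m*(n-s)) + chunkN m v * 2^(m*(n-1-s)) := lor_mul_pow_add _ a _ hlt
    rw [PySem.List.enumerate_cons, List.foldl_cons]
    have hstep : PySem.Int.bor ((a * 2^(m*(n-s)) : Nat) : Int)
        ((PySem.Int.band v ((1 : Int) <<< m - 1)) <<< (((m : Int)) * ((n : Int) - 1 - (s : Int))).toNat)
        = (((a * 2^m + chunkN m v) * 2^(m*(n-1-s)) : Nat) : Int) := by
      rw [band_eq_chunkN, hshift, Int.shiftLeft_eq]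
      have hc : ((chunkN m v : Nat) : Int) * 2^(m*(n-1-s))
          = ((chunkN m v * 2^(m*(n-1-s)) : Nat) : Int) := by push_cast; ring
      rw [hc, PySem.Int.bor_natCast, hor]
      congr 1
      rw [hns, Nat.pow_add]; ring
    rw [hstep]
    have h1 : ((s : Int) + 1) = ((s + 1 : Nat) : Int) := by push_cast; ring
    rw [h1]
    have ihh := ih (s+1) (a * 2^m + chunkN m v) (by simp [List.length_cons] at hlen; omega)
    have h2 : n - (s + 1) = n - 1 - s := by omega
    rw [h2] at ihh
    rw [ihh]
    congr 1
    have hts : t.length = n - 1 - s := by simp [List.length_cons] at hlen; omega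
    simp [bigVal, hts, hns, Nat.pow_add, Nat.pow_mul]
    ring

-- A's fold, reverse = false (ascending bit positions)
theorem foldA_fwd (m : Nat) : ∀ (l : List Int) (s r : Nat), r < 2^(m*s) →
    (PySem.List.enumerate l (s : Int)).foldl
      (fun result p => PySem.Int.bor result
        ((PySem.Int.band p.2 ((1 : Int) <<< m - 1)) <<< (((m : Int) * p.1).toNat)))
      ((r : Nat) : Int)
      = ((r + 2^(m*s) * littleVal m l : Nat) : Int) := by
  intro l
  induction l with
  | nil => intro s r _; simp [PySem.List.enumerate_nil, littleVal]
  | cons v t ih =>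
    intro s r hr
    have hcn := (band_mask_bounds v m).2
    have hshift : (((m : Int)) * (s : Int)).toNat = m * s := by
      rw [← Nat.cast_mul, Int.toNat_natCast]
    have hor : chunkN m v * 2^(m*s) ||| r = chunkN m v * 2^(m*s) + r :=
      lor_mul_pow_add _ _ r hr
    have hsucc : m * (s + 1) = m * s + m := by ring
    have hlt : chunkN m v * 2^(m*s) + r < 2^(m*(s+1)) := by
      have h1 : chunkN m v * 2^(m*s) + r < (chunkN m v + 1) * 2^(m*s) := by
        have := Nat.two_pow_pos (m*s); nlinarith
      have h2 : (chunkN m v + 1) * 2^(m*s) ≤ 2^m * 2^(m*s) :=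
        Nat.mul_le_mul_right _ (by omega)
      rw [hsucc, Nat.pow_add]
      calc chunkN m v * 2^(m*s) + r < (chunkN m v + 1) * 2^(m*s) := h1
        _ ≤ 2^m * 2^(m*s) := h2
        _ = 2^(m*s) * 2^m := by ring
    rw [PySem.List.enumerate_cons, List.foldl_cons]
    have hstep : PySem.Int.bor ((r : Nat) : Int)
        ((PySem.Int.band v ((1 : Int) <<< m - 1)) <<< (((m : Int)) * (s : Int)).toNat)
        = ((chunkN m v * 2^(m*s) + r : Nat) : Int) := by
      rw [band_eq_chunkN, hshift, Int.shiftLeft_eq]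
      have hc : ((chunkN m v : Nat) : Int) * 2^(m*s)
          = ((chunkN m v * 2^(m*s) : Nat) : Int) := by push_cast; ring
      rw [hc, PySem.Int.bor_natCast, Nat.lor_comm, hor]
    rw [hstep]
    have h1 : ((s : Int) + 1) = ((s + 1 : Nat) : Int) := by push_cast; ring
    rw [h1, ih (s+1) (chunkN m v * 2^(m*s) + r) hlt]
    congr 1
    simp [littleVal, hsucc, Nat.pow_add]
    ring

theorem bigVal_append (m : Nat) : ∀ (t : List Int) (v : Int),
    bigVal m (t ++ [v]) = bigVal m t * 2^m + chunkN m v := by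
  intro t
  induction t with
  | nil => intro v; simp [bigVal]
  | cons x s ih =>
    intro v
    simp only [List.cons_append, bigVal, List.length_append, List.length_cons, ih,
      List.length_nil]
    ring

theorem bigVal_reverse (m : Nat) : ∀ (l : List Int),
    bigVal m l.reverse = littleVal m l := by
  intro l
  induction l with
  | nil => simp [bigVal, littleVal]
  | cons x t ih =>
    rw [List.reverse_cons, bigVal_append, ih]
    simp [littleVal]; ring

-- ===== VERDICT (by name: the statement is the Claim_ definition above) =====
theorem pack_values_spec : Claim_equal_pack_values := by
  intro values num_bits reverse _hdom hpre
  obtain ⟨m, rfl⟩ : ∃ m : Nat, num_bits = (m : Int) := ⟨num_bits.toNat, (Int.toNat_of_nonneg hpre).symm⟩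
  unfold Spec_pack_values pack_values pack_values_alt
  simp only [Int.toNat_natCast]
  cases reverse with
  | true =>
    simp only [reduceIte]
    have ha := foldA_rev m values.length values 0 0 (by simp)
    have hb := hornerB m values 0
    simp only [Nat.sub_zero, Nat.cast_zero, zero_mul, zero_add] at ha hb
    rw [ha, hb]
  | false =>
    simp only [Bool.false_eq_true, reduceIte]
    have ha := foldA_fwd m values 0 0 (by simp)
    have hb := hornerB m values.reverse 0
    simp only [Nat.mul_zero, Nat.cast_zero, Nat.zero_mul, Nat.zero_add, zero_add, pow_zero, one_mul] at ha hb
    rw [ha, hb, bigVal_reverse]
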